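-- pv_equiv track=rewrite | github.com/mnur53/code_jam | 2018/Qualification/3_go_gopher/go_gopher.py | get_min_field_score
-- ===== SOURCE A (Python) =====
-- def get_score_of_3x3(field,i,j):
--   return sum(field[i-1][j-1:j+2]) + sum(field[i][j-1:j+2]) + sum(field[i+1][j-1:j+2])
--
-- def get_min_field_score(field):
--
--   min_score = 10
--   i = -1
--   j = -1
--
--   for i in range(1, len(field)-1):
--     for j in range(1, len(field[i])-1):
--       calc_score = get_score_of_3x3(field,i,j)
--
--       if calc_score == 0:
--         return i, j
--
--       if min_score > calc_score:
--         min_score = calc_score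
--         min_i = i
--         min_j = j
--
--   return min_i, min_j
-- ===== SOURCE B (Python) =====
-- def get_min_field_score(field):
--   # Per-row prefix sums built once; each 3x3 score is then six table lookups
--   # (two per row, clamped like Python slices) instead of re-summing nine cells.
--   pre = []
--   for row in field:
--     p = [0]
--     s = 0
--     for v in row:
--       s += v
--       p.append(s)
--     pre.append(p)
--
--   def win(r, a, b):
--     p = pre[r]
--     n = len(p) - 1
--     return p[b if b < n else n] - p[a if a < n else n]
--
--   min_score = 10
--   best = None
--   for i in range(1, len(field) - 1):
--     for j in range(1, len(field[i]) - 1):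
--       s = win(i - 1, j - 1, j + 2) + win(i, j - 1, j + 2) + win(i + 1, j - 1, j + 2)
--       if s == 0:
--         return i, j
--       if min_score > s:
--         min_score = s
--         best = (i, j)
--   return best
-- ===== Notes on version B (the rewrite author's own statement) =====
-- stated objective: alternative
-- what changed: B precomputes per-row prefix sums once and evaluates each 3x3 window as six clamped table lookups (two per row) instead of re-summing nine cells per cell; loop order, early return on 0 and strict-min tie-breaking are unchanged, and B returns None where A's min_i/min_j stay unbound (A raises UnboundLocalError there, excluded by Pre_).
import Mathlib
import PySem

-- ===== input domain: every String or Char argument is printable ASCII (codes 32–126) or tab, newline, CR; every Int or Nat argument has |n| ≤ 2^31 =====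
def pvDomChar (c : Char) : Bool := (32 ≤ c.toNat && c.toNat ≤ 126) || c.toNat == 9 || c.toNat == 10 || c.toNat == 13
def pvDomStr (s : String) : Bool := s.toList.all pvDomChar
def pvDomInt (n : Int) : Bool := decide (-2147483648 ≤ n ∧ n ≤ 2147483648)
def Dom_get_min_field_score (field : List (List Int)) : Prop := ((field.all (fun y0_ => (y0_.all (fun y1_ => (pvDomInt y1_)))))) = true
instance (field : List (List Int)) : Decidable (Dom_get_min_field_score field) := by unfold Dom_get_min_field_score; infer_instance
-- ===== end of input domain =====

-- B replaces the 9-cell re-summation of each 3x3 window by per-row prefix sums built once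
-- (six clamped lookups per window); loop order, early return and tie-breaking unchanged
-- (objective: alternative). A raises UnboundLocalError where no interior 3x3 sum is < 10;
-- Pre_ excludes exactly those inputs (Python B returns None there).


-- ===== PORT A =====
-- get_score_of_3x3: field[i±1] is pyGetD — exact here because every call site has i-1, i, i+1 in range
def pvScoreA (field : List (List Int)) (i j : Int) : Int :=
  (PySem.List.slice (PySem.List.pyGetD field (i-1) []) (some (j-1)) (some (j+2))).sum +
  (PySem.List.slice (PySem.List.pyGetD field i []) (some (j-1)) (some (j+2))).sum +
  (PySem.List.slice (PySem.List.pyGetD field (i+1) []) (some (j-1)) (some (j+2))).sum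

-- inner 'for j' loop; .error = the early 'return i, j'
def pvLoopJ (field : List (List Int)) (i : Int) :
    List Int → Int × Int × Int → Except (Int × Int) (Int × Int × Int)
  | [], st => .ok st
  | j :: js, (ms, mi, mj) =>
    let s := pvScoreA field i j
    if s = 0 then .error (i, j)
    else if ms > s then pvLoopJ field i js (s, i, j)
    else pvLoopJ field i js (ms, mi, mj)

-- outer 'for i' loop
def pvLoopI (field : List (List Int)) :
    List Int → Int × Int × Int → Except (Int × Int) (Int × Int × Int)
  | [], st => .ok st
  | i :: is, st =>
    match pvLoopJ field i (PySem.List.pyRange 1 (((PySem.List.pyGetD field i []).length : Int) - 1) 1) st with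
    | .error r => .error r
    | .ok st' => pvLoopI field is st'

-- where Python A raises UnboundLocalError (min_i/min_j never set) the port returns the
-- sentinel (-1,-1); Pre_ excludes exactly those inputs
def get_min_field_score (field : List (List Int)) : Int × Int :=
  match pvLoopI field (PySem.List.pyRange 1 ((field.length : Int) - 1) 1) (10, -1, -1) with
  | .error r => r
  | .ok (_, mi, mj) => (mi, mj)

-- ===== PORT B =====
-- p = [0]; s = 0; for v in row: s += v; p.append(s)
def pvPrefixRow (row : List Int) : List Int :=
  (row.foldl (fun (acc : List Int × Int) v => (acc.1 ++ [acc.2 + v], acc.2 + v)) ([0], 0)).1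

-- pre = []; for row in field: pre.append(prefix(row))
def pvPre (field : List (List Int)) : List (List Int) :=
  field.foldl (fun acc row => acc ++ [pvPrefixRow row]) []

-- win(r, a, b) = p[min(b,n)] - p[min(a,n)] with p = pre[r], n = len(p)-1
def pvWin (pre : List (List Int)) (r a b : Int) : Int :=
  let p := PySem.List.pyGetD pre r []
  let n : Int := (p.length : Int) - 1
  PySem.List.pyGetD p (if b < n then b else n) 0 - PySem.List.pyGetD p (if a < n then a else n) 0

def pvScoreB (pre : List (List Int)) (i j : Int) : Int :=
  pvWin pre (i-1) (j-1) (j+2) + pvWin pre i (j-1) (j+2) + pvWin pre (i+1) (j-1) (j+2)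

def pvLoopJB (field pre : List (List Int)) (i : Int) :
    List Int → Int × Option (Int × Int) → Except (Int × Int) (Int × Option (Int × Int))
  | [], st => .ok st
  | j :: js, (ms, best) =>
    let s := pvScoreB pre i j
    if s = 0 then .error (i, j)
    else if ms > s then pvLoopJB field pre i js (s, some (i, j))
    else pvLoopJB field pre i js (ms, best)

def pvLoopIB (field pre : List (List Int)) :
    List Int → Int × Option (Int × Int) → Except (Int × Int) (Int × Option (Int × Int))
  | [], st => .ok st
  | i :: is, st =>
    match pvLoopJB field pre i (PySem.List.pyRange 1 (((PySem.List.pyGetD field i []).length : Int) - 1) 1) st with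
    | .error r => .error r
    | .ok st' => pvLoopIB field pre is st'

-- where Python B returns None (best never set, outside Pre_) the port returns the
-- placeholder (-1, -1) via getD
def get_min_field_score_alt (field : List (List Int)) : Int × Int :=
  match pvLoopIB field (pvPre field) (PySem.List.pyRange 1 ((field.length : Int) - 1) 1) (10, none) with
  | .error r => r
  | .ok (_, best) => best.getD (-1, -1)

-- ===== PRECONDITION & SPEC =====
-- 3x3 window sum at interior cell (i, j) (1 ≤ i, j), used only by Pre_/Raises_
def pvCellScore (field : List (List Int)) (i j : Nat) : Int :=
  (((field.getD (i-1) []).drop (j-1)).take 3).sum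
  + (((field.getD i []).drop (j-1)).take 3).sum
  + (((field.getD (i+1) []).drop (j-1)).take 3).sum

-- Pre_ excludes exactly the inputs where Python A raises UnboundLocalError (and B returns
-- None): those with no interior cell whose 3x3 sum is below the initial min_score of 10
-- (in particular every field smaller than 3x3)
def Pre_get_min_field_score (field : List (List Int)) : Prop :=
  ∃ i ∈ List.range' 1 (field.length - 2),
    ∃ j ∈ List.range' 1 ((field.getD i []).length - 2), pvCellScore field i j < 10
instance (field : List (List Int)) : Decidable (Pre_get_min_field_score field) := by
  unfold Pre_get_min_field_score; infer_instance

def pvWitness_get_min_field_score : List (List Int) := [[0,0,0],[0,0,0],[0,0,0]]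

def Spec_get_min_field_score (field : List (List Int)) (out : Int × Int) : Prop := out = get_min_field_score_alt field
instance (field : List (List Int)) (out : Int × Int) : Decidable (Spec_get_min_field_score field out) := by unfold Spec_get_min_field_score; infer_instance

-- ===== CLAIM (what is proved, stated in full; the proofs are below) =====
def Claim_equal_get_min_field_score : Prop := ∀ (field : List (List Int)), Dom_get_min_field_score field → Pre_get_min_field_score field → Spec_get_min_field_score field (get_min_field_score field)

-- ===== LEMMAS AND PROOFS =====
-- A's loop state seen through B's: A's (min_i, min_j) is best.getD (-1,-1)
def pvStRel (st : Int × Option (Int × Int)) : Int × Int × Int :=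
  (st.1, (st.2.getD (-1, -1)).1, (st.2.getD (-1, -1)).2)

def pvMapRes : Except (Int × Int) (Int × Option (Int × Int)) → Except (Int × Int) (Int × Int × Int)
  | .error r => .error r
  | .ok st => .ok (pvStRel st)

-- running sums of row starting from s (proof-only helper)
def pvPS (s : Int) : List Int → List Int
  | [] => []
  | v :: vs => (s + v) :: pvPS (s + v) vs

theorem pvPrefixRow_eq (row : List Int) : pvPrefixRow row = 0 :: pvPS 0 row := by
  have h : ∀ (row : List Int) (p0 : List Int) (s0 : Int),
      row.foldl (fun (acc : List Int × Int) v => (acc.1 ++ [acc.2 + v], acc.2 + v)) (p0, s0)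
        = (p0 ++ pvPS s0 row, s0 + row.sum) := by
    intro row
    induction row with
    | nil => intro p0 s0; simp [pvPS]
    | cons v vs ih => intro p0 s0; simp only [List.foldl_cons, ih, pvPS]; simp; ring
  rw [pvPrefixRow, h row [0] 0]; simp

theorem pvPS_length (row : List Int) : ∀ s : Int, (pvPS s row).length = row.length := by
  induction row with
  | nil => intro s; simp [pvPS]
  | cons v vs ih => intro s; simp [pvPS, ih]

theorem pvPS_get (row : List Int) : ∀ (s : Int) (k : Nat), k < row.length →
    (pvPS s row)[k]? = some (s + (row.take (k+1)).sum) := by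
  induction row with
  | nil => intro s k hk; simp at hk
  | cons v vs ih =>
    intro s k hk
    cases k with
    | zero => simp [pvPS]
    | succ k =>
      simp only [pvPS, List.getElem?_cons_succ]
      rw [ih (s+v) k (by simpa using hk)]
      simp [List.take_succ_cons]
      ring

theorem prefix_lookup (row : List Int) (k : Int) (hk : 0 ≤ k) :
    PySem.List.pyGetD (pvPrefixRow row)
      (if k < ((pvPrefixRow row).length : Int) - 1 then k else ((pvPrefixRow row).length : Int) - 1) 0
      = (row.take k.toNat).sum := by
  have hlen : (pvPrefixRow row).length = row.length + 1 := by
    rw [pvPrefixRow_eq]; simp [pvPS_length]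
  have hget : ∀ m : Nat, m ≤ row.length → (pvPrefixRow row)[m]? = some ((row.take m).sum) := by
    intro m hm
    rw [pvPrefixRow_eq]
    cases m with
    | zero => simp
    | succ m =>
      simp only [List.getElem?_cons_succ]
      rw [pvPS_get row 0 m (by omega)]
      simp
  set n : Int := ((pvPrefixRow row).length : Int) - 1 with hn
  have hn' : n = (row.length : Int) := by rw [hn, hlen]; push_cast; ring
  set idx : Int := if k < n then k else n with hidx
  have h0 : 0 ≤ idx := by rw [hidx]; split_ifs <;> omega
  have h1 : idx < ((pvPrefixRow row).length : Int) := by rw [hidx]; split_ifs <;> omega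
  have h2 : idx.toNat ≤ row.length := by rw [hidx]; split_ifs <;> omega
  rw [PySem.List.pyGetD_eq_getElem _ 0 h0 h1]
  have h := hget idx.toNat h2
  rw [List.getElem?_eq_getElem (by omega)] at h
  rw [Option.some.injEq] at h
  rw [h]
  rw [hidx]
  split_ifs with hc
  · rfl
  · rw [List.take_of_length_le (by omega), List.take_of_length_le (by omega)]

theorem slice_sum (row : List Int) (a b : Int) (ha : 0 ≤ a) (hab : a ≤ b) :
    (PySem.List.slice row (some a) (some b)).sum
      = (row.take b.toNat).sum - (row.take a.toNat).sum := by
  have hb : (0:Int) ≤ b := le_trans ha hab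
  rw [PySem.List.slice_toNat row ha hb]
  have hab2 : a.toNat ≤ b.toNat := Int.toNat_le_toNat hab
  rw [List.take_drop]
  have h1 : (row.take b.toNat).sum
      = ((row.take b.toNat).take a.toNat).sum + ((row.take b.toNat).drop a.toNat).sum :=
    (List.sum_take_add_sum_drop _ _).symm
  have h2 : (row.take b.toNat).take a.toNat = row.take a.toNat := by
    rw [List.take_take]; congr 1; omega
  have h3 : a.toNat + (b.toNat - a.toNat) = b.toNat := by omega
  rw [h3]
  rw [h2] at h1
  omega

theorem pvPre_eq (field : List (List Int)) : pvPre field = field.map pvPrefixRow := by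
  rw [pvPre]
  simpa using PySem.List.foldl_append_singleton_eq_map pvPrefixRow field []

theorem win_eq (field : List (List Int)) (r a b : Int) (hr : 0 ≤ r)
    (hr2 : r < (field.length : Int)) (ha : 0 ≤ a) (hab : a ≤ b) :
    pvWin (pvPre field) r a b
      = (PySem.List.slice (PySem.List.pyGetD field r []) (some a) (some b)).sum := by
  rw [pvPre_eq]
  simp only [pvWin]
  rw [PySem.List.pyGetD_eq_getElem (field.map pvPrefixRow) [] hr (by simpa using hr2),
      PySem.List.pyGetD_eq_getElem field [] hr hr2, List.getElem_map]
  rw [prefix_lookup _ b (le_trans ha hab), prefix_lookup _ a ha,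
      slice_sum _ a b ha hab]

theorem score_eq (field : List (List Int)) (i j : Int) (hi : 1 ≤ i)
    (hi2 : i < (field.length : Int) - 1) (hj : 1 ≤ j) :
    pvScoreB (pvPre field) i j = pvScoreA field i j := by
  unfold pvScoreA pvScoreB
  rw [win_eq field (i-1) (j-1) (j+2) (by omega) (by omega) (by omega) (by omega),
      win_eq field i (j-1) (j+2) (by omega) (by omega) (by omega) (by omega),
      win_eq field (i+1) (j-1) (j+2) (by omega) (by omega) (by omega) (by omega)]

theorem loopJ_eq (field : List (List Int)) (i : Int) (hi : 1 ≤ i)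
    (hi2 : i < (field.length : Int) - 1) :
    ∀ (js : List Int) (st : Int × Option (Int × Int)), (∀ j ∈ js, 1 ≤ j) →
      pvLoopJ field i js (pvStRel st) = pvMapRes (pvLoopJB field (pvPre field) i js st) := by
  intro js
  induction js with
  | nil => intro st h; rfl
  | cons j js ih =>
    intro st h
    obtain ⟨ms, best⟩ := st
    simp only [pvLoopJ, pvLoopJB, pvStRel]
    rw [score_eq field i j hi hi2 (h j (by simp))]
    split_ifs with h1 h2
    · rfl
    · exact ih (pvScoreA field i j, some (i, j)) (fun x hx => h x (List.mem_cons_of_mem _ hx))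
    · exact ih (ms, best) (fun x hx => h x (List.mem_cons_of_mem _ hx))

theorem loopI_eq (field : List (List Int)) :
    ∀ (is : List Int) (st : Int × Option (Int × Int)),
      (∀ i ∈ is, 1 ≤ i ∧ i < (field.length : Int) - 1) →
      pvLoopI field is (pvStRel st) = pvMapRes (pvLoopIB field (pvPre field) is st) := by
  intro is
  induction is with
  | nil => intro st h; rfl
  | cons i is ih =>
    intro st h
    simp only [pvLoopI, pvLoopIB]
    rw [loopJ_eq field i (h i (by simp)).1 (h i (by simp)).2 _ st
        (fun j hj => ((PySem.List.mem_pyRange_one).1 hj).1)]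
    cases hres : pvLoopJB field (pvPre field) i (PySem.List.pyRange 1 (((PySem.List.pyGetD field i []).length : Int) - 1) 1) st with
    | error r => rfl
    | ok st' => exact ih st' (fun x hx => h x (List.mem_cons_of_mem _ hx))

-- ===== VERDICT (by name: the statement is the Claim_ definition above) =====
theorem get_min_field_score_spec : Claim_equal_get_min_field_score := by
  intro field _ _
  unfold Spec_get_min_field_score get_min_field_score get_min_field_score_alt
  have h := loopI_eq field (PySem.List.pyRange 1 ((field.length : Int) - 1) 1) (10, none)
    (fun i hi => by have := (PySem.List.mem_pyRange_one).1 hi; omega)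
  have h10 : ((10 : Int), (-1 : Int), (-1 : Int)) = pvStRel (10, none) := rfl
  rw [h10, h]
  cases hres : pvLoopIB field (pvPre field) (PySem.List.pyRange 1 ((field.length : Int) - 1) 1) (10, none) with
  | error r => rfl
  | ok st => obtain ⟨ms, best⟩ := st; cases best <;> rfl
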